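-- pv_equiv track=rewrite | github.com/madeibao/PythonAlgorithm | PartA/Py笛卡尔内积和.py | getmultiply
-- ===== SOURCE A (Python) =====
-- import itertools
--
-- def getmultiply(A, B):
--     list2 = []
--     sum2 = 0
--     for x in itertools.product(A, B):
--         x = list(x)
--         list2.append(x)
--     for i in list2:
--         sum2 += i[0]*i[1]
--
--     return sum2
-- ===== SOURCE B (Python) =====
-- def getmultiply(A, B):
--     return sum(A) * sum(B)
-- ===== Notes on version B (the rewrite author's own statement) =====
-- stated objective: faster
-- what changed: Replaced the O(|A|*|B|) Cartesian-product pair list and summation loop by the distributive-law factorization sum(A)*sum(B).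
import Mathlib
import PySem

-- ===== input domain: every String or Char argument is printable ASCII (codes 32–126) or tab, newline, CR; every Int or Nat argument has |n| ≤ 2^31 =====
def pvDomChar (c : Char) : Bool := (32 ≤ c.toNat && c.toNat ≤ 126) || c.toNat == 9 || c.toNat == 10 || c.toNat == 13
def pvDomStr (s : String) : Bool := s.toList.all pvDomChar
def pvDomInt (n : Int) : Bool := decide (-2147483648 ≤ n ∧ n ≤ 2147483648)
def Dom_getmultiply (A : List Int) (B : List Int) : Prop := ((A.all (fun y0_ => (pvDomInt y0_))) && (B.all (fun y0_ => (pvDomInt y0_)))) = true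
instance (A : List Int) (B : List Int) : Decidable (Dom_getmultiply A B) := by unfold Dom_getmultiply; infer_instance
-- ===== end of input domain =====

-- B replaces the O(|A|·|B|) pair-list construction and summation loop by the factorization sum(A)*sum(B) (faster, asymptotic).

-- ===== PORT A =====
-- itertools.product(A, B) in row-major order; list2 collects the pairs, then a second loop sums i[0]*i[1].
def getmultiply (A : List Int) (B : List Int) : Int :=
  let list2 : List (Int × Int) := A.flatMap (fun a => B.map (fun b => (a, b)))
  let sum2 : Int := list2.foldl (fun s i => s + i.1 * i.2) 0
  sum2

-- ===== PORT B =====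
def getmultiply_alt (A : List Int) (B : List Int) : Int := A.sum * B.sum

-- ===== PRECONDITION & SPEC =====
def Spec_getmultiply (A : List Int) (B : List Int) (out : Int) : Prop := out = getmultiply_alt A B
instance (A : List Int) (B : List Int) (out : Int) : Decidable (Spec_getmultiply A B out) := by unfold Spec_getmultiply; infer_instance

-- ===== CLAIM (what is proved, stated in full; the proofs are below) =====
def Claim_equal_getmultiply : Prop := ∀ (A : List Int) (B : List Int), Dom_getmultiply A B → Spec_getmultiply A B (getmultiply A B)

-- ===== LEMMAS AND PROOFS =====
theorem pv_foldl_row (a : Int) (B : List Int) (s : Int) :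
    (B.map (fun b => (a, b))).foldl (fun s i => s + i.1 * i.2) s = s + a * B.sum := by
  induction B generalizing s with
  | nil => simp
  | cons b bs ih => simp [ih, mul_add]; ring

theorem pv_foldl_flat (A : List Int) (B : List Int) (s : Int) :
    (A.flatMap (fun a => B.map (fun b => (a, b)))).foldl (fun s i => s + i.1 * i.2) s
      = s + A.sum * B.sum := by
  induction A generalizing s with
  | nil => simp
  | cons a as ih => simp [List.flatMap_cons, List.foldl_append, pv_foldl_row, ih]; ring

-- ===== VERDICT (by name: the statement is the Claim_ definition above) =====
theorem getmultiply_spec : Claim_equal_getmultiply := by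
  intro A B _
  unfold Spec_getmultiply getmultiply getmultiply_alt
  simpa using pv_foldl_flat A B 0
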